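-- pv_equiv track=rewrite | github.com/vacoola1/python-tests | blocks.py | find_symbols_positions
-- ===== SOURCE A (Python) =====
-- def find_symbols_positions(payout, screen, wild):
--     symbols_positions = {}
--     for symbol in payout:
--         positions = []
--         for x, row in enumerate(screen):
--             for y, screen_symbol in enumerate(row):
--                 if screen_symbol == symbol or screen_symbol == wild:
--                     positions.append({'x': x, 'y': y})
--
--         if len(positions) > 0:
--             symbols_positions[symbol] = positions
--
--     return symbols_positions
-- ===== SOURCE B (Python) =====
-- def find_symbols_positions(payout, screen, wild):
--     buckets = {}
--     for symbol in payout: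
--         buckets[symbol] = []
--     for x, row in enumerate(screen):
--         for y, screen_symbol in enumerate(row):
--             if screen_symbol == wild:
--                 for positions in buckets.values():
--                     positions.append({'x': x, 'y': y})
--             elif screen_symbol in buckets:
--                 buckets[screen_symbol].append({'x': x, 'y': y})
--     return {symbol: positions for symbol, positions in buckets.items() if positions}
-- ===== Notes on version B (the rewrite author's own statement) =====
-- stated objective: faster
-- what changed: Instead of rescanning the whole screen once per payout symbol, B makes a single pass over the screen, bucketing each cell's position into a per-symbol dict (wild cells are appended to every bucket), then filters the buckets to the non-empty ones.
import Mathlib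
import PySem

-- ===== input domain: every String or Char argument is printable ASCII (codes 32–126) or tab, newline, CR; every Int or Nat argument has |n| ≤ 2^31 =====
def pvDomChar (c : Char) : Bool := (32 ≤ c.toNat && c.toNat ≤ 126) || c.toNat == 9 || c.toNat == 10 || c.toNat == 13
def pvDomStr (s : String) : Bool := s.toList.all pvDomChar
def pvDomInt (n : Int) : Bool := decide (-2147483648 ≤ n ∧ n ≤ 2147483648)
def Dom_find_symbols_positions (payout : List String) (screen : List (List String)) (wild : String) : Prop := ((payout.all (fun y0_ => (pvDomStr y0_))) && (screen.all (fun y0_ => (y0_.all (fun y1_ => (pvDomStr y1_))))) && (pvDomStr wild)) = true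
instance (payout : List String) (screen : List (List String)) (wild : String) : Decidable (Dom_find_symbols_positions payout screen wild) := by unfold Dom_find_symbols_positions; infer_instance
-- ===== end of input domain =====

-- B replaces A's per-payout-symbol rescans of the whole screen by a single screen pass that
-- buckets positions per symbol (wild cells go to every bucket); equivalence is about the return value only.

-- ===== PORT A =====
def find_symbols_positions (payout : List String) (screen : List (List String)) (wild : String) : List (String × List (List (String × Int))) :=
  (payout.foldl (fun sp symbol =>
      let positions :=
        (PySem.List.enumerate screen 0).foldl (fun acc xr =>
          (PySem.List.enumerate xr.2 0).foldl (fun acc yc =>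
            if yc.2 == symbol || yc.2 == wild then
              acc ++ [[("x", xr.1), ("y", yc.1)]]
            else acc) acc) []
      if positions.length > 0 then sp.insert symbol positions else sp)
    (PySem.Dict.empty : PySem.Dict String (List (List (String × Int))))).items

-- ===== PORT B =====
def find_symbols_positions_alt (payout : List String) (screen : List (List String)) (wild : String) : List (String × List (List (String × Int))) :=
  let buckets : PySem.Dict String (List (List (String × Int))) :=
    payout.foldl (fun d symbol => d.insert symbol []) PySem.Dict.empty
  let buckets :=
    (PySem.List.enumerate screen 0).foldl (fun d xr =>
      (PySem.List.enumerate xr.2 0).foldl (fun d yc =>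
        if yc.2 == wild then
          -- 'for positions in buckets.values(): positions.append({'x': x, 'y': y})':
          -- appends the position to every value; keys and their order unchanged (exact, hand-ported)
          PySem.Dict.mk (d.items.map (fun p => (p.1, p.2 ++ [[("x", xr.1), ("y", yc.1)]])))
        else if d.contains yc.2 then
          -- 'buckets[screen_symbol].append({'x': x, 'y': y})' (guarded by 'screen_symbol in buckets')
          d.insert yc.2 (d.getD yc.2 [] ++ [[("x", xr.1), ("y", yc.1)]])
        else d) d) buckets
  -- dict comprehension over buckets.items(): keys are already unique, so its items are exactly this filtered list (exact)
  buckets.items.filter (fun p => decide (p.2 ≠ []))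

-- ===== PRECONDITION & SPEC =====
def Spec_find_symbols_positions (payout : List String) (screen : List (List String)) (wild : String) (out : List (String × List (List (String × Int)))) : Prop := out = find_symbols_positions_alt payout screen wild
instance (payout : List String) (screen : List (List String)) (wild : String) (out : List (String × List (List (String × Int)))) : Decidable (Spec_find_symbols_positions payout screen wild out) := by unfold Spec_find_symbols_positions; infer_instance

-- ===== CLAIM (what is proved, stated in full; the proofs are below) =====
def Claim_equal_find_symbols_positions : Prop := ∀ (payout : List String) (screen : List (List String)) (wild : String), Dom_find_symbols_positions payout screen wild → Spec_find_symbols_positions payout screen wild (find_symbols_positions payout screen wild)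

-- ===== LEMMAS AND PROOFS =====

-- the positions list A computes for a payout symbol s (row-major filtered scan)
def pvRowPos (wild s : String) (x : Int) (row : List String) : List (List (String × Int)) :=
  ((PySem.List.enumerate row 0).filter (fun yc => yc.2 == s || yc.2 == wild)).map
    (fun yc => [("x", x), ("y", yc.1)])

def pvPos (wild s : String) (screen : List (List String)) : List (List (String × Int)) :=
  (PySem.List.enumerate screen 0).flatMap (fun xr => pvRowPos wild s xr.1 xr.2)

-- generic facts about literal dicts built over a key list (specific to the shapes in the two ports)
theorem pv_insert_mem {α : Type} (ks : List String) (f : String → α) (s : String) (v : α) (hv : v = f s) (h : s ∈ ks) :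
    ((PySem.Dict.mk (ks.map (fun k => (k, f k)))).insert s v) = PySem.Dict.mk (ks.map (fun k => (k, f k))) := by
  subst hv
  apply PySem.Dict.ext
  rw [PySem.Dict.items_insert_of_contains]
  · show (ks.map (fun k => (k, f k))).map _ = _
    rw [List.map_map]
    apply List.map_congr_left
    intro k hk
    by_cases hks : k = s
    · subst hks; simp
    · simp [hks]
  · simp [PySem.Dict.contains_mk]; exact h

theorem pv_insert_not_mem {α : Type} (ks : List String) (f : String → α) (s : String) (v : α) (hv : v = f s) (h : ¬ s ∈ ks) :
    ((PySem.Dict.mk (ks.map (fun k => (k, f k)))).insert s v) = PySem.Dict.mk ((ks ++ [s]).map (fun k => (k, f k))) := by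
  subst hv
  apply PySem.Dict.ext
  rw [PySem.Dict.items_insert_of_not_contains]
  · simp
  · simp [PySem.Dict.contains_mk]; intro x hx hxs; exact h (hxs ▸ hx)

theorem pv_insert_mem' {α : Type} (ks : List String) (v : String → α) (s : String) (w : α) (h : s ∈ ks) :
    ((PySem.Dict.mk (ks.map (fun k => (k, v k)))).insert s w)
      = PySem.Dict.mk (ks.map (fun k => (k, if k == s then w else v k))) := by
  apply PySem.Dict.ext
  rw [PySem.Dict.items_insert_of_contains]
  · show (ks.map (fun k => (k, v k))).map _ = _
    rw [List.map_map]
    apply List.map_congr_left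
    intro k hk
    by_cases hks : k = s
    · subst hks; simp
    · simp [hks]
  · simp [PySem.Dict.contains_mk]; exact h

theorem pv_set_add_mem (ks : List String) (x : String) (h : x ∈ ks) : PySem.Set.add ks x = ks := by
  simp [PySem.Set.add, PySem.Set.contains, h]

theorem pv_set_add_not_mem (ks : List String) (x : String) (h : ¬ x ∈ ks) : PySem.Set.add ks x = ks ++ [x] := by
  simp [PySem.Set.add, PySem.Set.contains, h]

-- A's inner double loop computes pvPos
theorem pvA_positions (wild s : String) (screen : List (List String)) :
    (PySem.List.enumerate screen 0).foldl (fun acc xr =>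
        (PySem.List.enumerate xr.2 0).foldl (fun acc yc =>
          if yc.2 == s || yc.2 == wild then
            acc ++ [[("x", xr.1), ("y", yc.1)]]
          else acc) acc) []
      = pvPos wild s screen := by
  have h : (fun (acc : List (List (String × Int))) (xr : Int × List String) =>
      (PySem.List.enumerate xr.2 0).foldl (fun acc yc =>
          if yc.2 == s || yc.2 == wild then
            acc ++ [[("x", xr.1), ("y", yc.1)]]
          else acc) acc)
      = (fun acc xr => acc ++ pvRowPos wild s xr.1 xr.2) := by
    funext acc xr
    rw [PySem.List.foldl_append_if]; rfl
  rw [h, PySem.List.foldl_append_eq_flatMap]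
  rfl

-- A's dict-building loop, from a dict whose items already pair nodup keys with their pvPos
theorem pvA_fold (wild : String) (screen : List (List String)) :
    ∀ (payout : List String) (ks : List String), ks.Nodup →
      ((payout.foldl (fun sp symbol =>
          if (pvPos wild symbol screen).length > 0 then sp.insert symbol (pvPos wild symbol screen) else sp)
        (PySem.Dict.mk (ks.map (fun s => (s, pvPos wild s screen))))).items)
      = (PySem.Set.update ks (payout.filter (fun s => decide (pvPos wild s screen ≠ [])))).map
          (fun s => (s, pvPos wild s screen)) := by
  intro payout
  induction payout with
  | nil => intro ks h; rfl
  | cons s rest ih =>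
    intro ks hnd
    by_cases hp : (pvPos wild s screen).length > 0
    · have hne : decide (pvPos wild s screen ≠ []) = true := by
        simp only [decide_eq_true_iff]; intro hnil; rw [hnil] at hp; simp at hp
      by_cases hmem : s ∈ ks
      · simp only [List.foldl_cons, List.filter_cons, hne, if_pos hp,
          pv_insert_mem ks _ s _ rfl hmem, if_true]
        rw [ih ks hnd]
        have hu : PySem.Set.update ks (s :: rest.filter (fun s => decide (pvPos wild s screen ≠ [])))
            = PySem.Set.update ks (rest.filter (fun s => decide (pvPos wild s screen ≠ []))) := by
          simp only [PySem.Set.update, List.foldl_cons, pv_set_add_mem ks s hmem]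
        rw [hu]
      · simp only [List.foldl_cons, List.filter_cons, hne, if_pos hp,
          pv_insert_not_mem ks _ s _ rfl hmem, if_true]
        rw [ih (ks ++ [s]) (by simp [List.nodup_append, hnd]; intro a ha has; exact hmem (has ▸ ha))]
        have hu : PySem.Set.update ks (s :: rest.filter (fun s => decide (pvPos wild s screen ≠ [])))
            = PySem.Set.update (ks ++ [s]) (rest.filter (fun s => decide (pvPos wild s screen ≠ []))) := by
          simp only [PySem.Set.update, List.foldl_cons, pv_set_add_not_mem ks s hmem]
        rw [hu]
    · have hne : decide (pvPos wild s screen ≠ []) = false := by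
        simp only [decide_eq_false_iff_not, not_not]
        cases h : pvPos wild s screen with
        | nil => rfl
        | cons a t => rw [h] at hp; simp at hp
      simp only [List.foldl_cons, List.filter_cons, hne, if_neg hp]
      exact ih ks hnd

-- B's init loop builds the bucket dict over the distinct payout symbols
theorem pvB_init :
    ∀ (payout : List String) (ks : List String), ks.Nodup →
      (payout.foldl (fun d symbol => d.insert symbol [])
        (PySem.Dict.mk (ks.map (fun s => (s, ([] : List (List (String × Int))))))))
      = PySem.Dict.mk ((PySem.Set.update ks payout).map (fun s => (s, []))) := by
  intro payout
  induction payout with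
  | nil => intro ks h; rfl
  | cons s rest ih =>
    intro ks hnd
    by_cases hmem : s ∈ ks
    · simp only [List.foldl_cons, pv_insert_mem ks (fun _ => ([] : List (List (String × Int)))) s _ rfl hmem]
      rw [ih ks hnd]
      have hu : PySem.Set.update ks (s :: rest) = PySem.Set.update ks rest := by
        simp only [PySem.Set.update, List.foldl_cons, pv_set_add_mem ks s hmem]
      rw [hu]
    · simp only [List.foldl_cons, pv_insert_not_mem ks (fun _ => ([] : List (List (String × Int)))) s _ rfl hmem]
      rw [ih (ks ++ [s]) (by simp [List.nodup_append, hnd]; intro a ha has; exact hmem (has ▸ ha))]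
      have hu : PySem.Set.update ks (s :: rest) = PySem.Set.update (ks ++ [s]) rest := by
        simp only [PySem.Set.update, List.foldl_cons, pv_set_add_not_mem ks s hmem]
      rw [hu]

-- B's inner (row) loop extends every bucket by that row's matches
theorem pvB_row (wild : String) (x : Int) :
    ∀ (l : List (Int × String)) (ks : List String) (v : String → List (List (String × Int))), ks.Nodup →
      (l.foldl (fun d yc =>
          if yc.2 == wild then
            PySem.Dict.mk (d.items.map (fun p => (p.1, p.2 ++ [[("x", x), ("y", yc.1)]])))
          else if d.contains yc.2 then
            d.insert yc.2 (d.getD yc.2 [] ++ [[("x", x), ("y", yc.1)]])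
          else d)
        (PySem.Dict.mk (ks.map (fun s => (s, v s)))))
      = PySem.Dict.mk (ks.map (fun s => (s, v s ++
          ((l.filter (fun yc => yc.2 == s || yc.2 == wild)).map (fun yc => [("x", x), ("y", yc.1)]))))) := by
  intro l
  induction l with
  | nil =>
    intro ks v hnd
    simp
  | cons yc rest ih =>
    intro ks v hnd
    rw [List.foldl_cons]
    by_cases hw : yc.2 == wild
    · rw [if_pos hw]
      have hstep : PySem.Dict.mk ((PySem.Dict.mk (ks.map (fun s => (s, v s)))).items.map
            (fun p => (p.1, p.2 ++ [[("x", x), ("y", yc.1)]])))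
          = PySem.Dict.mk (ks.map (fun s => (s, v s ++ [[("x", x), ("y", yc.1)]]))) := by
        show PySem.Dict.mk ((ks.map (fun s => (s, v s))).map _) = _
        rw [List.map_map]
        rfl
      rw [hstep, ih ks _ hnd]
      congr 1
      apply List.map_congr_left
      intro k hk
      have hcond : (yc.2 == k || yc.2 == wild) = true := by simp [hw]
      simp only [List.filter_cons, hcond, if_true, List.map_cons]
      simp [List.append_assoc]
    · rw [if_neg (by simpa using hw)]
      by_cases hmem : yc.2 ∈ ks
      · have hc : (PySem.Dict.mk (ks.map (fun s => (s, v s)))).contains yc.2 = true := by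
          simp [PySem.Dict.contains_mk]; exact hmem
        rw [if_pos hc]
        have hgd : (PySem.Dict.mk (ks.map (fun s => (s, v s)))).getD yc.2 [] = v yc.2 := by
          apply PySem.Dict.getD_of_mem_items
          · exact List.mem_map.mpr ⟨yc.2, hmem, rfl⟩
          · show ((ks.map (fun s => (s, v s))).map Prod.fst).Nodup
            rw [List.map_map]
            simpa [Function.comp_def] using hnd
        rw [hgd]
        rw [pv_insert_mem' ks v yc.2 (v yc.2 ++ [[("x", x), ("y", yc.1)]]) hmem, ih ks _ hnd]
        congr 1
        apply List.map_congr_left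
        intro k hk
        by_cases hky : k = yc.2
        · subst hky
          simp [List.append_assoc]
        · have h1 : (k == yc.2) = false := by simp [hky]
          have h2 : (yc.2 == k || yc.2 == wild) = false := by
            simp [hw]; intro hc; exact hky hc.symm
          simp only [List.filter_cons, h2, h1]
          simp
      · have hc : (PySem.Dict.mk (ks.map (fun s => (s, v s)))).contains yc.2 = false := by
          simp [PySem.Dict.contains_mk]; intro a ha hc; exact hmem (hc ▸ ha)
        rw [if_neg (by simp [hc])]
        rw [ih ks v hnd]
        congr 1
        apply List.map_congr_left
        intro k hk
        have h1 : (yc.2 == k) = false := by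
          simp; intro hc; exact hmem (hc ▸ hk)
        simp [h1, hw]

-- B's outer (screen) loop
theorem pvB_screen (wild : String) :
    ∀ (E : List (Int × List String)) (ks : List String) (v : String → List (List (String × Int))), ks.Nodup →
      (E.foldl (fun d xr =>
          (PySem.List.enumerate xr.2 0).foldl (fun d yc =>
            if yc.2 == wild then
              PySem.Dict.mk (d.items.map (fun p => (p.1, p.2 ++ [[("x", xr.1), ("y", yc.1)]])))
            else if d.contains yc.2 then
              d.insert yc.2 (d.getD yc.2 [] ++ [[("x", xr.1), ("y", yc.1)]])
            else d) d)
        (PySem.Dict.mk (ks.map (fun s => (s, v s)))))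
      = PySem.Dict.mk (ks.map (fun s => (s, v s ++ E.flatMap (fun xr => pvRowPos wild s xr.1 xr.2)))) := by
  intro E
  induction E with
  | nil => intro ks v hnd; simp
  | cons xr rows ih =>
    intro ks v hnd
    rw [List.foldl_cons, pvB_row wild xr.1 (PySem.List.enumerate xr.2 0) ks v hnd,
        ih ks _ hnd]
    congr 1
    apply List.map_congr_left
    intro k hk
    simp [pvRowPos, List.append_assoc]

-- building a set from a filtered list is filtering the set
theorem pvSet_ofList_filter (q : String → Bool) :
    ∀ (xs acc : List String),
      ((xs.filter q).foldl PySem.Set.add (acc.filter q)) = (xs.foldl PySem.Set.add acc).filter q := by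
  intro xs
  induction xs with
  | nil => intro acc; rfl
  | cons x rest ih =>
    intro acc
    by_cases hq : q x
    · rw [List.filter_cons_of_pos hq, List.foldl_cons, List.foldl_cons]
      by_cases hmem : x ∈ acc
      · rw [pv_set_add_mem _ _ (List.mem_filter.mpr ⟨hmem, hq⟩), pv_set_add_mem _ _ hmem, ih]
      · rw [pv_set_add_not_mem _ _ (by intro hc; exact hmem (List.mem_filter.mp hc).1),
            pv_set_add_not_mem _ _ hmem]
        have hfa : List.filter q (acc ++ [x]) = List.filter q acc ++ [x] := by
          simp [List.filter_append, hq]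
        rw [← hfa]; exact ih (acc ++ [x])
    · rw [List.filter_cons_of_neg hq, List.foldl_cons]
      by_cases hmem : x ∈ acc
      · rw [pv_set_add_mem _ _ hmem, ih]
      · rw [pv_set_add_not_mem _ _ hmem, ← ih (acc ++ [x]), List.filter_append]
        simp [List.filter_cons_of_neg hq]

-- ===== VERDICT (by name: the statement is the Claim_ definition above) =====
theorem find_symbols_positions_spec : Claim_equal_find_symbols_positions := by
  intro payout screen wild _
  unfold Spec_find_symbols_positions
  -- A's side
  have hA : find_symbols_positions payout screen wild
      = (PySem.Set.ofList (payout.filter (fun s => decide (pvPos wild s screen ≠ [])))).map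
          (fun s => (s, pvPos wild s screen)) := by
    unfold find_symbols_positions
    have hstep : (fun (sp : PySem.Dict String (List (List (String × Int)))) (symbol : String) =>
        let positions :=
          (PySem.List.enumerate screen 0).foldl (fun acc xr =>
            (PySem.List.enumerate xr.2 0).foldl (fun acc yc =>
              if yc.2 == symbol || yc.2 == wild then
                acc ++ [[("x", xr.1), ("y", yc.1)]]
              else acc) acc) []
        if positions.length > 0 then sp.insert symbol positions else sp)
        = (fun sp symbol =>
            if (pvPos wild symbol screen).length > 0 then sp.insert symbol (pvPos wild symbol screen) else sp) := by
      funext sp symbol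
      show (if _ then sp.insert symbol ((PySem.List.enumerate screen 0).foldl _ []) else sp) = _
      rw [pvA_positions wild symbol screen]
    rw [hstep]
    have hempty : (PySem.Dict.empty : PySem.Dict String (List (List (String × Int))))
        = PySem.Dict.mk ((([] : List String)).map (fun s => (s, pvPos wild s screen))) := rfl
    rw [hempty, pvA_fold wild screen payout [] List.nodup_nil]
    rfl
  -- B's side
  have hB : find_symbols_positions_alt payout screen wild
      = ((PySem.Set.ofList payout).map (fun s => (s, pvPos wild s screen))).filter
          (fun p => decide (p.2 ≠ [])) := by
    unfold find_symbols_positions_alt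
    dsimp only
    have hempty : (PySem.Dict.empty : PySem.Dict String (List (List (String × Int))))
        = PySem.Dict.mk ((([] : List String)).map (fun s => (s, ([] : List (List (String × Int)))))) := rfl
    rw [hempty, pvB_init payout [] List.nodup_nil]
    have hupd : PySem.Set.update ([] : List String) payout = PySem.Set.ofList payout :=
      (PySem.Set.ofList_eq_foldl payout).symm
    rw [hupd, pvB_screen wild (PySem.List.enumerate screen 0) (PySem.Set.ofList payout)
          (fun _ => []) (PySem.Set.nodup_ofList payout)]
    show (PySem.Dict.mk ((PySem.Set.ofList payout).map
        (fun s => (s, [] ++ (PySem.List.enumerate screen 0).flatMap (fun xr => pvRowPos wild s xr.1 xr.2))))).items.filter _ = _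
    simp only [List.nil_append]
    rfl
  rw [hA, hB, List.filter_map]
  have hq : ((fun (p : String × List (List (String × Int))) => decide (p.2 ≠ []))
        ∘ (fun s => (s, pvPos wild s screen)))
      = (fun s => decide (pvPos wild s screen ≠ [])) := rfl
  rw [hq]
  congr 1
  have := pvSet_ofList_filter (fun s => decide (pvPos wild s screen ≠ [])) payout []
  simp only [List.filter_nil] at this
  rw [PySem.Set.ofList_eq_foldl, this, ← PySem.Set.ofList_eq_foldl]
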